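-- pv_equiv track=rewrite | github.com/jylitalo/TwitterBot | files/twitbot.py | validate_api_config
-- ===== SOURCE A (Python) =====
-- def validate_api_config(options):
--     """
--     Validate twitter API configuration (and mail_from option)
--     """
--     mandatory = ['access_token_key', 'access_token_secret',
--                  'consumer_key', 'consumer_secret', 'mail_from',
--                  'smtp_host', 'smtp_port']
--     missing_options = list(set(mandatory) - set(options))
--     missing_options.sort()
--     errors = []
--     for option in missing_options:
--         errors += [option + ' is missing from api section.']
--     return errors
-- ===== SOURCE B (Python) =====
-- def validate_api_config(options):
--     """
--     Validate twitter API configuration (and mail_from option)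
--     """
--     mandatory = ['access_token_key', 'access_token_secret',
--                  'consumer_key', 'consumer_secret', 'mail_from',
--                  'smtp_host', 'smtp_port']
--     return [option + ' is missing from api section.'
--             for option in mandatory if option not in options]
-- ===== Notes on version B (the rewrite author's own statement) =====
-- stated objective: simpler
-- what changed: B drops the set-difference, the intermediate list and the explicit sort: since the mandatory list is already alphabetically ordered and duplicate-free, a single comprehension over it filtering absent options yields A's sorted result directly.
import Mathlib
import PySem

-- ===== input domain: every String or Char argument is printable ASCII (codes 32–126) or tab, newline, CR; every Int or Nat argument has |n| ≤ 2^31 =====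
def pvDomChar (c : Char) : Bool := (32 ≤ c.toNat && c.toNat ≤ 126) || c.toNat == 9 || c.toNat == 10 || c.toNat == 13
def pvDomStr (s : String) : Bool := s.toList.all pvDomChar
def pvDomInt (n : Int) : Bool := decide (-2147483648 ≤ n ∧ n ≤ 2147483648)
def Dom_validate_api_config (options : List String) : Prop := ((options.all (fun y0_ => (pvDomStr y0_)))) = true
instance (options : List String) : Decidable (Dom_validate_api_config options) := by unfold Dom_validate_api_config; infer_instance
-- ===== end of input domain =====

-- B replaces A's set-difference + sort + append loop by one comprehension over the
-- already alphabetically ordered mandatory list (objective: simpler).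

-- ===== PORT A =====
def pvMandatory : List String :=
  ["access_token_key", "access_token_secret",
   "consumer_key", "consumer_secret", "mail_from",
   "smtp_host", "smtp_port"]

def validate_api_config (options : List String) : List String :=
  -- list(set(mandatory) - set(options)); .sort()  — the set's hash order is consumed
  -- only by the sort, so sorting the Set's element list is exact
  let missing_options :=
    PySem.List.sorted (PySem.Set.diff (PySem.Set.ofList pvMandatory) options) (fun x => x) false
  missing_options.foldl (fun errors option => errors ++ [option ++ " is missing from api section."]) []

-- ===== PORT B =====
def validate_api_config_alt (options : List String) : List String :=
  (pvMandatory.filter (fun option => !(options.contains option))).map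
    (fun option => option ++ " is missing from api section.")

-- ===== PRECONDITION & SPEC =====
def Spec_validate_api_config (options : List String) (out : List String) : Prop := out = validate_api_config_alt options
instance (options : List String) (out : List String) : Decidable (Spec_validate_api_config options out) := by unfold Spec_validate_api_config; infer_instance

-- ===== CLAIM (what is proved, stated in full; the proofs are below) =====
def Claim_equal_validate_api_config : Prop := ∀ (options : List String), Dom_validate_api_config options → Spec_validate_api_config options (validate_api_config options)

-- ===== LEMMAS AND PROOFS =====

-- set(mandatory) - set(options) is the in-order filter of the (duplicate-free) mandatory list
theorem diff_mandatory (options : List String) :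
    PySem.Set.diff (PySem.Set.ofList pvMandatory) options
      = pvMandatory.filter (fun option => !(options.contains option)) := by
  rw [show PySem.Set.ofList pvMandatory = pvMandatory from
        PySem.Set.ofList_eq_self_of_nodup pvMandatory (by decide)]
  simp [PySem.Set.diff, PySem.Set.contains]

-- the filtered mandatory list is already ≤-sorted, so Python's sort leaves it unchanged
theorem sorted_filter_mandatory (p : String → Bool) :
    PySem.List.sorted (pvMandatory.filter p) (fun x => x) false = pvMandatory.filter p := by
  apply PySem.List.sorted_eq_self_of_pairwise
  have hpw : pvMandatory.Pairwise (fun a b => a.toList ≤ b.toList) := by decide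
  exact List.Pairwise.sublist (pvMandatory.filter_sublist)
    (hpw.imp (fun h => String.le_iff_toList_le.mpr h))

-- ===== VERDICT (by name: the statement is the Claim_ definition above) =====
theorem validate_api_config_spec : Claim_equal_validate_api_config := by
  intro options _
  unfold Spec_validate_api_config validate_api_config validate_api_config_alt
  rw [diff_mandatory, sorted_filter_mandatory, PySem.List.foldl_append_singleton_eq_map,
      List.nil_append]
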